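-- pv_equiv track=rewrite | github.com/ligaroba/datastructures-and-algorithms | inteview/preparation/arrays/arrange_array_alternatively.py | arrngeArrAltnate
-- ===== SOURCE A (Python) =====
-- def arrngeArrAltnate(arr):
--     n=len(arr)
--     i=0
--     curr_min=arr[0]
--     curr_max=arr[n-1]
--     while i<n:
--         j=n-1
--         #shift the arr elements to the right
--         while j>i:
--             arr[j]=arr[j-1]
--             j-=1
--         arr[i]=curr_max
--         curr_max=arr[n-1]
--         i+=2
--     return arr
-- ===== SOURCE B (Python) =====
-- def arrngeArrAltnate(arr):
--     # Direct O(n) two-pointer placement: out = [last, first, last-1, first+1, ...]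
--     res = []
--     lo, hi = 0, len(arr) - 1
--     while lo < hi:
--         res.append(arr[hi])
--         res.append(arr[lo])
--         lo += 1
--         hi -= 1
--     if lo == hi:
--         res.append(arr[lo])
--     arr[:] = res
--     return arr
-- ===== Notes on version B (the rewrite author's own statement) =====
-- stated objective: faster
-- what changed: Replaced the repeated O(n) right-shift of the suffix per output slot with a single two-pointer pass that reads the last/first remaining elements directly and rebuilds the array once.
import Mathlib
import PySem

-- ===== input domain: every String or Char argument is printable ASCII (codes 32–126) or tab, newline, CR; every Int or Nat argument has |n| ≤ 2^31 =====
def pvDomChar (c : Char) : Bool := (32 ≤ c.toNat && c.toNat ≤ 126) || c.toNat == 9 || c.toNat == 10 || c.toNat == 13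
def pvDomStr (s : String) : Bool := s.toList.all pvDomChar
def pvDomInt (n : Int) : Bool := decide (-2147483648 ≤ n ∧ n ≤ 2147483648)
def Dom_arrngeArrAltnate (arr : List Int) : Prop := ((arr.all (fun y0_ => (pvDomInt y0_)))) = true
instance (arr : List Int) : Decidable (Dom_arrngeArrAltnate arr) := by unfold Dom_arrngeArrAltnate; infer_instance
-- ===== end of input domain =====

-- B replaces A's quadratic repeated suffix right-shift by a single O(n) two-pointer pass
-- (objective: faster, asymptotic). A mutates arr in place; B performs the same final
-- mutation (arr[:] = res); the equivalence proved here is about the return value.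

-- ===== PORT A =====
-- inner while: while j > i: arr[j] = arr[j-1]; j -= 1
def shiftA (arr : List Int) (i j : Nat) : List Int :=
  if i < j then shiftA (arr.set j (arr.getD (j - 1) 0)) i (j - 1) else arr
termination_by j
decreasing_by omega

-- outer while: while i < n: shift; arr[i] = curr_max; curr_max = arr[n-1]; i += 2
def outerA (n i : Nat) (currMax : Int) (arr : List Int) : List Int :=
  if i < n then
    outerA n (i + 2) (((shiftA arr i (n - 1)).set i currMax).getD (n - 1) 0)
      ((shiftA arr i (n - 1)).set i currMax)
  else arr
termination_by n - i
decreasing_by omega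

def arrngeArrAltnate (arr : List Int) : List Int :=
  let n := arr.length
  -- curr_min = arr[0] is read but never used; arr[0]/arr[n-1] raise on the empty list (excluded by Pre_)
  outerA n 0 (arr.getD (n - 1) 0) arr

-- ===== PORT B =====
def loopB (arr res : List Int) (lo hi : Int) : List Int :=
  if lo < hi then
    loopB arr (res ++ [(PySem.List.pyGet? arr hi).getD 0, (PySem.List.pyGet? arr lo).getD 0]) (lo + 1) (hi - 1)
  else if lo = hi then res ++ [(PySem.List.pyGet? arr lo).getD 0]
  else res
termination_by (hi - lo + 1).toNat
decreasing_by omega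

def arrngeArrAltnate_alt (arr : List Int) : List Int :=
  loopB arr [] 0 ((arr.length : Int) - 1)

-- ===== PRECONDITION & SPEC =====
-- Pre_ excludes only the empty list, on which A raises IndexError at arr[0].
def Pre_arrngeArrAltnate (arr : List Int) : Prop := arr ≠ []
instance (arr : List Int) : Decidable (Pre_arrngeArrAltnate arr) := by unfold Pre_arrngeArrAltnate; infer_instance
def pvWitness_arrngeArrAltnate : List Int := [3, 1, 2]

def Spec_arrngeArrAltnate (arr : List Int) (out : List Int) : Prop := out = arrngeArrAltnate_alt arr
instance (arr : List Int) (out : List Int) : Decidable (Spec_arrngeArrAltnate arr out) := by unfold Spec_arrngeArrAltnate; infer_instance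

-- ===== CLAIM (what is proved, stated in full; the proofs are below) =====
def Claim_equal_arrngeArrAltnate : Prop := ∀ (arr : List Int), Dom_arrngeArrAltnate arr → Pre_arrngeArrAltnate arr → Spec_arrngeArrAltnate arr (arrngeArrAltnate arr)

-- ===== LEMMAS AND PROOFS =====

-- both programs compute this interleaving: [last, first, last-1, first+1, ...]
def g : List Int → List Int
  | [] => []
  | [x] => [x]
  | x :: y :: rest => ((y :: rest).getLastD 0) :: x :: g ((y :: rest).dropLast)
termination_by s => s.length
decreasing_by simp

lemma g_cons (x : Int) (l : List Int) (h : l ≠ []) :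
    g (x :: l) = l.getLastD 0 :: x :: g l.dropLast := by
  cases l with
  | nil => exact absurd rfl h
  | cons y rest => simp [g]

lemma getD_app (pre l : List Int) (k : Nat) (d : Int) :
    (pre ++ l).getD (pre.length + k) d = l.getD k d := by
  induction pre with
  | nil => simp
  | cons a pre ih => simpa [Nat.succ_add, List.getD] using ih

lemma set_app (pre l : List Int) (k : Nat) (v : Int) :
    (pre ++ l).set (pre.length + k) v = pre ++ l.set k v := by
  induction pre with
  | nil => simp
  | cons a pre ih => simpa [Nat.succ_add] using ih

lemma getD_last (l : List Int) (d : Int) (h : l ≠ []) :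
    l.getD (l.length - 1) d = l.getLastD d := by
  induction l with
  | nil => exact absurd rfl h
  | cons a l ih =>
    cases l with
    | nil => rfl
    | cons b t => simpa [List.getD] using ih (by simp)

lemma pyget_at (pre suf : List Int) (x : Int) :
    (PySem.List.pyGet? (pre ++ x :: suf) ((pre.length : Nat) : Int)).getD 0 = x := by
  simp [PySem.List.pyGet?_natCast, List.getElem?_append_right]

lemma getD_app_left (l l' : List Int) (n : Nat) (h : n < l.length) (d : Int) :
    (l ++ l').getD n d = l.getD n d := by
  simp [List.getD, List.getElem?_append_left h]

lemma dropLast_concat_getLastD (l : List Int) (h : l ≠ []) :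
    l.dropLast ++ [l.getLastD 0] = l := by
  simp [List.getLastD_eq_getLast?, List.getLast?_eq_some_getLast h, List.dropLast_append_getLast]

lemma shiftL (seg : List Int) : ∀ (pre suf : List Int), seg ≠ [] →
    shiftA (pre ++ seg ++ suf) pre.length (pre.length + seg.length - 1)
      = pre ++ (seg.headD 0 :: seg.dropLast) ++ suf := by
  induction seg using List.reverseRecOn with
  | nil => intro pre suf h; exact absurd rfl h
  | append_singleton ys y ih =>
    intro pre suf _
    cases ys with
    | nil =>
      rw [shiftA]
      simp
    | cons x t =>
      have hys : (x :: t) ≠ [] := by simp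
      have hlen : (x :: t ++ [y]).length = t.length + 2 := by simp
      rw [shiftA, if_pos (by simp only [hlen]; omega)]
      have hidx1 : pre.length + (x :: t ++ [y]).length - 1 = (pre ++ (x :: t)).length + 0 := by
        simp only [hlen, List.length_append, List.length_cons]; omega
      have hidx2 : pre.length + (x :: t ++ [y]).length - 1 - 1 = pre.length + t.length := by
        simp only [hlen]; omega
      have hread : (pre ++ (x :: t ++ [y]) ++ suf).getD
          (pre.length + (x :: t ++ [y]).length - 1 - 1) 0 = (x :: t).getLastD 0 := by
        rw [hidx2]
        have h2 : pre ++ (x :: t ++ [y]) ++ suf = pre ++ ((x :: t) ++ ([y] ++ suf)) := by simp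
        rw [h2, getD_app, getD_app_left (x :: t) ([y] ++ suf) t.length (by simp) 0]
        have h3 : t.length = (x :: t).length - 1 := by simp
        rw [h3, getD_last (x :: t) 0 hys]
      rw [hread]
      have hset : (pre ++ (x :: t ++ [y]) ++ suf).set
          (pre.length + (x :: t ++ [y]).length - 1) ((x :: t).getLastD 0)
          = pre ++ (x :: t) ++ (((x :: t).getLastD 0) :: suf) := by
        have hL : pre ++ (x :: t ++ [y]) ++ suf = (pre ++ (x :: t)) ++ ([y] ++ suf) := by simp
        rw [hidx1, hL, set_app]
        simp
      rw [hset, hidx2]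
      have hidx3 : pre.length + t.length = pre.length + (x :: t).length - 1 := by
        simp only [List.length_cons]; omega
      rw [hidx3, ih pre (((x :: t).getLastD 0) :: suf) hys]
      have hconcat : (x :: t).dropLast ++ [(x :: t).getLastD 0] = x :: t :=
        dropLast_concat_getLastD _ hys
      simp only [List.headD_cons, ← List.cons_append, List.dropLast_concat]
      conv_rhs => rw [← hconcat]
      cases t <;> simp

lemma getLastD_irrel (l : List Int) (h : l ≠ []) (d d' : Int) : l.getLastD d = l.getLastD d' := by
  simp [List.getLastD_eq_getLast?, List.getLast?_eq_some_getLast h]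

lemma LA : ∀ (m : Nat) (seg pre : List Int), seg.length = m → seg ≠ [] →
    outerA (pre.length + m) pre.length (seg.getLastD 0) (pre ++ seg) = pre ++ g seg := by
  intro m
  induction m using Nat.strong_induction_on with
  | _ m IH =>
    intro seg pre hm hne
    have hm1 : 1 ≤ m := by cases seg with | nil => exact absurd rfl hne | cons a l => simp at hm; omega
    rw [outerA, if_pos (by omega)]
    have hshift : shiftA (pre ++ seg) pre.length (pre.length + m - 1)
        = pre ++ (seg.headD 0 :: seg.dropLast) := by
      have h := shiftL seg pre [] hne
      rw [hm] at h
      simpa using h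
    have hset : (pre ++ (seg.headD 0 :: seg.dropLast)).set pre.length (seg.getLastD 0)
        = pre ++ (seg.getLastD 0 :: seg.dropLast) := by
      rw [show pre.length = pre.length + 0 from rfl, set_app]
      rfl
    rw [hshift, hset]
    have hlen1 : (seg.getLastD 0 :: seg.dropLast).length = m := by
      simp [List.length_dropLast]
      omega
    have hgetD : (pre ++ (seg.getLastD 0 :: seg.dropLast)).getD (pre.length + m - 1) 0
        = (seg.getLastD 0 :: seg.dropLast).getLastD 0 := by
      have h1 : pre.length + m - 1 = pre.length + (m - 1) := by omega
      rw [h1, getD_app]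
      have h2 : m - 1 = (seg.getLastD 0 :: seg.dropLast).length - 1 := by rw [hlen1]
      rw [h2, getD_last _ 0 (by simp)]
    rw [hgetD]
    cases seg with
    | nil => exact absurd rfl hne
    | cons a l =>
      cases l with
      | nil =>
        -- seg = [a]: next call has i = pre.length + 2 ≥ n = pre.length + 1, stop
        simp only [List.length_cons, List.length_nil] at hm
        rw [outerA, if_neg (by omega)]
        simp [g]
      | cons b rest =>
        have hm2 : m = rest.length + 2 := by simp at hm; omega
        have hdl : (a :: b :: rest).dropLast = a :: (b :: rest).dropLast := by simp
        by_cases hrest : rest = []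
        · subst hrest
          -- seg = [a, b]: next call has i = n, stop
          rw [outerA, if_neg (by simp only [List.length_nil] at hm2; omega)]
          simp [g]
        · have ht : (b :: rest).dropLast ≠ [] := by
            simp [List.dropLast_cons_of_ne_nil hrest]
          have hcm' : ((a :: b :: rest).getLastD 0 :: (a :: b :: rest).dropLast).getLastD 0
              = (b :: rest).dropLast.getLastD 0 := by
            rw [hdl]
            simp only [List.getLastD_cons]
            exact getLastD_irrel _ ht _ _
          have harr : pre ++ ((a :: b :: rest).getLastD 0 :: (a :: b :: rest).dropLast)
              = (pre ++ [(a :: b :: rest).getLastD 0, a]) ++ (b :: rest).dropLast := by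
            rw [hdl]; simp
          have hlen2 : (b :: rest).dropLast.length = m - 2 := by
            simp [List.length_dropLast]; omega
          have hn : pre.length + m = (pre ++ [(a :: b :: rest).getLastD 0, a]).length + (m - 2) := by
            simp; omega
          have hi : pre.length + 2 = (pre ++ [(a :: b :: rest).getLastD 0, a]).length := by simp
          rw [hcm', harr, hn, hi]
          have := IH (m - 2) (by omega) ((b :: rest).dropLast)
            (pre ++ [(a :: b :: rest).getLastD 0, a]) hlen2 ht
          rw [this]
          have hg : g (a :: b :: rest)
              = (b :: rest).getLastD 0 :: a :: g ((b :: rest).dropLast) := by simp [g]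
          rw [hg]
          simp

lemma LB : ∀ (m : Nat) (seg pre suf res : List Int), seg.length = m →
    loopB (pre ++ seg ++ suf) res (pre.length : Int) ((pre.length : Int) + seg.length - 1)
      = res ++ g seg := by
  intro m
  induction m using Nat.strong_induction_on with
  | _ m IH =>
    intro seg pre suf res hm
    rcases List.eq_nil_or_concat seg with rfl | ⟨ys, y, rfl⟩
    · rw [loopB, if_neg (by simp only [List.length_nil, Nat.cast_zero]; omega),
        if_neg (by simp only [List.length_nil, Nat.cast_zero]; omega)]
      simp [g]
    · simp only [List.concat_eq_append] at hm ⊢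
      cases ys with
      | nil =>
        rw [loopB, if_neg (by simp), if_pos (by simp)]
        have harr : pre ++ ([] ++ [y]) ++ suf = pre ++ y :: suf := by simp
        rw [harr, pyget_at]
        simp [g]
      | cons x t =>
        have hlen : ((x :: t) ++ [y]).length = t.length + 2 := by simp
        rw [loopB, if_pos (by simp only [hlen]; push_cast; omega)]
        have ehi : (PySem.List.pyGet? (pre ++ ((x :: t) ++ [y]) ++ suf)
            ((pre.length : Int) + ((x :: t) ++ [y]).length - 1)).getD 0 = y := by
          have h1 : pre ++ ((x :: t) ++ [y]) ++ suf = (pre ++ x :: t) ++ y :: suf := by simp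
          have h2 : (pre.length : Int) + ((x :: t) ++ [y]).length - 1
              = (((pre ++ x :: t).length : Nat) : Int) := by simp; push_cast; omega
          rw [h1, h2, pyget_at]
        have elo : (PySem.List.pyGet? (pre ++ ((x :: t) ++ [y]) ++ suf)
            ((pre.length : Int))).getD 0 = x := by
          have h1 : pre ++ ((x :: t) ++ [y]) ++ suf = pre ++ x :: (t ++ [y] ++ suf) := by simp
          rw [h1, pyget_at]
        rw [ehi, elo]
        have h3 : (pre.length : Int) + 1 = (((pre ++ [x]).length : Nat) : Int) := by
          simp
        have h4 : (pre.length : Int) + ((x :: t) ++ [y]).length - 1 - 1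
            = (((pre ++ [x]).length : Nat) : Int) + (t.length : Int) - 1 := by
          simp only [hlen, List.length_append, List.length_cons, List.length_nil]
          push_cast; omega
        have h5 : pre ++ ((x :: t) ++ [y]) ++ suf = (pre ++ [x]) ++ t ++ ([y] ++ suf) := by simp
        rw [h3, h4, h5]
        have := IH t.length (by omega) t (pre ++ [x]) ([y] ++ suf) (res ++ [y, x]) rfl
        rw [this]
        have hg : g ((x :: t) ++ [y]) = y :: x :: g t := by
          have : (x :: t) ++ [y] = x :: (t ++ [y]) := by simp
          rw [this, g_cons x (t ++ [y]) (by simp)]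
          simp
        rw [hg]
        simp

-- ===== VERDICT (by name: the statement is the Claim_ definition above) =====
theorem arrngeArrAltnate_spec : Claim_equal_arrngeArrAltnate := by
  intro arr _ hpre
  unfold Spec_arrngeArrAltnate arrngeArrAltnate_alt
  show outerA arr.length 0 (arr.getD (arr.length - 1) 0) arr = loopB arr [] 0 ((arr.length : Int) - 1)
  have hA := LA arr.length arr [] rfl hpre
  have hB := LB arr.length arr [] [] [] rfl
  simp only [List.length_nil, List.nil_append, List.append_nil, Nat.zero_add,
    Nat.cast_zero, zero_add] at hA hB
  rw [getD_last arr 0 hpre, hA, hB]
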